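-- pv_equiv track=rewrite | github.com/geraldmuvengei06/e-learning-career-path-recommendation | learning-recommendation-backend-v4.py | _group_recommendations
-- ===== SOURCE A (Python) =====
-- from typing import List, Dict, Set, Tuple
-- from collections import defaultdict
--
-- def _group_recommendations(
--
--     ranked_courses: List[Dict],
--     skill_gaps: Dict
-- ) -> Dict:
--     """Group recommendations by skill gap category."""
--     grouped_recommendations = defaultdict(list)
--
--     for category, gaps in skill_gaps.items():
--         relevant_courses = [
--             course for course in ranked_courses
--             if any(gap.lower() in course["skills_covered"].lower() for gap in gaps)
--         ]
--         grouped_recommendations[category] = relevant_courses[:5]  # Top 5 per category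
--
--     return dict(grouped_recommendations)
-- ===== SOURCE B (Python) =====
-- def _group_recommendations(
--
--     ranked_courses,
--     skill_gaps
-- ):
--     """Group recommendations by skill gap category (single distributing pass)."""
--     grouped = {category: [] for category in skill_gaps}
--     lowered = {category: [gap.lower() for gap in gaps]
--                for category, gaps in skill_gaps.items()}
--     if any(lowered.values()):  # skip the pass entirely when there are no gaps
--         for course in ranked_courses:
--             text = course["skills_covered"].lower()
--             for category, gaps in lowered.items():
--                 bucket = grouped[category]
--                 if len(bucket) < 5 and any(g in text for g in gaps):
--                     bucket.append(course)
--     return grouped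
-- ===== Notes on version B (the rewrite author's own statement) =====
-- stated objective: alternative
-- what changed: Instead of rebuilding a filtered list of all courses for every category (re-lowercasing each course's skills text per category and per gap) and slicing to 5, B initializes every category bucket empty and makes one distributing pass over the ranked courses, lowercasing each course's text once and appending it to each matching category bucket only while that bucket holds fewer than 5 entries.
import Mathlib
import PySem

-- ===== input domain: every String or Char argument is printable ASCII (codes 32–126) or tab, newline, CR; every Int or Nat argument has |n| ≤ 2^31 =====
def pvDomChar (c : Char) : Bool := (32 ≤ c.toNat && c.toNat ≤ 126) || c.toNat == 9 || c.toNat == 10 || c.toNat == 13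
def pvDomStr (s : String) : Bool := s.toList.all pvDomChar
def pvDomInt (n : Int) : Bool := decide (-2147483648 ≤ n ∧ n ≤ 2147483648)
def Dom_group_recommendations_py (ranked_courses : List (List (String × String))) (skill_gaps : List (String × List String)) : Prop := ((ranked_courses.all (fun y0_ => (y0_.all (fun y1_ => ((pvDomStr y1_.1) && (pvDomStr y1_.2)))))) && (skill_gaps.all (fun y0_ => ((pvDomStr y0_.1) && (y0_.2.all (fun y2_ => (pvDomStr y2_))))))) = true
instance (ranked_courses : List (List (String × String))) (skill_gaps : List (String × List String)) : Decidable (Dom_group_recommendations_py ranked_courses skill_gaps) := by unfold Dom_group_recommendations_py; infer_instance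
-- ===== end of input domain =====

-- B makes one distributing pass over the courses into capped per-category buckets instead of
-- A's per-category rescan of the whole course list; same results, text lowercased once per course.

-- ===== PORT A =====
-- course["skills_covered"] raises KeyError when the key is missing; ported as getD "" and those
-- inputs are excluded by Pre_ (the default is never read inside Pre_).
def group_recommendations_py (ranked_courses : List (List (String × String))) (skill_gaps : List (String × List String)) : List (String × List (List (String × String))) :=
  let grouped : PySem.Dict String (List (List (String × String))) :=
    skill_gaps.foldl (fun d cg =>
      let relevant := ranked_courses.filter (fun course =>
        cg.2.any (fun gap => PySem.Str.isIn (PySem.Str.lower gap)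
          (PySem.Str.lower ((PySem.Dict.mk course).getD "skills_covered" ""))))
      d.insert cg.1 (PySem.List.slice relevant none (some 5))) PySem.Dict.empty
  grouped.items

-- ===== PORT B =====
def group_recommendations_py_alt (ranked_courses : List (List (String × String))) (skill_gaps : List (String × List String)) : List (String × List (List (String × String))) :=
  let grouped0 : PySem.Dict String (List (List (String × String))) :=
    skill_gaps.foldl (fun d cg => d.insert cg.1 []) PySem.Dict.empty
  let lowered : PySem.Dict String (List String) :=
    skill_gaps.foldl (fun d cg => d.insert cg.1 (cg.2.map PySem.Str.lower)) PySem.Dict.empty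
  let final :=
    if lowered.values.any (fun gs => !gs.isEmpty) then
      ranked_courses.foldl (fun g course =>
        let text := PySem.Str.lower ((PySem.Dict.mk course).getD "skills_covered" "")
        lowered.items.foldl (fun g q =>
          let bucket := g.getD q.1 []
          if bucket.length < 5 && q.2.any (fun gap => PySem.Str.isIn gap text) then
            g.insert q.1 (bucket ++ [course])
          else g) g) grouped0
    else grouped0
  final.items

-- ===== PRECONDITION & SPEC =====
-- Pre_ excludes exactly the inputs on which Python A raises KeyError: some gap list is nonempty
-- and some course lacks the "skills_covered" key.
def Pre_group_recommendations_py (ranked_courses : List (List (String × String))) (skill_gaps : List (String × List String)) : Prop :=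
  (skill_gaps.any (fun cg => !cg.2.isEmpty)) = true →
    ∀ course ∈ ranked_courses, (course.any (fun p => p.1 == "skills_covered")) = true
instance (ranked_courses : List (List (String × String))) (skill_gaps : List (String × List String)) : Decidable (Pre_group_recommendations_py ranked_courses skill_gaps) := by unfold Pre_group_recommendations_py; infer_instance
def pvWitness_group_recommendations_py : (List (List (String × String))) × (List (String × List String)) :=
  ([[("skills_covered", "Python, SQL"), ("title", "Data 101")]], [("data", ["python"]), ("web", [])])

def Spec_group_recommendations_py (ranked_courses : List (List (String × String))) (skill_gaps : List (String × List String)) (out : List (String × List (List (String × String)))) : Prop := out = group_recommendations_py_alt ranked_courses skill_gaps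
instance (ranked_courses : List (List (String × String))) (skill_gaps : List (String × List String)) (out : List (String × List (List (String × String)))) : Decidable (Spec_group_recommendations_py ranked_courses skill_gaps out) := by unfold Spec_group_recommendations_py; infer_instance

-- ===== CLAIM (what is proved, stated in full; the proofs are below) =====
def Claim_equal_group_recommendations_py : Prop := ∀ (ranked_courses : List (List (String × String))) (skill_gaps : List (String × List String)), Dom_group_recommendations_py ranked_courses skill_gaps → Pre_group_recommendations_py ranked_courses skill_gaps → Spec_group_recommendations_py ranked_courses skill_gaps (group_recommendations_py ranked_courses skill_gaps)

-- ===== LEMMAS AND PROOFS =====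

def pvMapVal {V W : Type} (F : V → W) (d : PySem.Dict String V) : PySem.Dict String W :=
  PySem.Dict.mk (d.items.map (fun p => (p.1, F p.2)))

lemma pv_keys_mapVal {V W : Type} (F : V → W) (d : PySem.Dict String V) :
    (pvMapVal F d).keys = d.keys := by
  simp [pvMapVal, PySem.Dict.keys]

lemma pv_mapVal_insert {V W : Type} (F : V → W) (d : PySem.Dict String V) (k : String) (v : V) :
    pvMapVal F (d.insert k v) = (pvMapVal F d).insert k (F v) := by
  apply PySem.Dict.ext
  have hc : (pvMapVal F d).contains k = d.contains k := by
    rw [PySem.Dict.contains_eq_decide_mem_keys, PySem.Dict.contains_eq_decide_mem_keys,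
      pv_keys_mapVal]
  by_cases h : d.contains k = true
  · rw [show (pvMapVal F (d.insert k v)).items
        = (d.insert k v).items.map (fun p => (p.1, F p.2)) from rfl,
      PySem.Dict.items_insert_of_contains _ _ h,
      PySem.Dict.items_insert_of_contains _ _ (hc.trans h),
      show (pvMapVal F d).items = d.items.map (fun p => (p.1, F p.2)) from rfl,
      List.map_map, List.map_map]
    apply List.map_congr_left
    intro p _
    by_cases hp : p.1 = k <;> simp [hp]
  · rw [show (pvMapVal F (d.insert k v)).items
        = (d.insert k v).items.map (fun p => (p.1, F p.2)) from rfl,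
      PySem.Dict.items_insert_of_not_contains _ _ (by simp [h]),
      PySem.Dict.items_insert_of_not_contains _ _ (by simp [hc, h])]
    simp [pvMapVal]

lemma pv_foldl_insert_mapVal {V : Type} (F : List String → V)
    (sg : List (String × List String)) :
    ∀ d : PySem.Dict String (List String),
    sg.foldl (fun d cg => d.insert cg.1 (F cg.2)) (pvMapVal F d)
      = pvMapVal F (sg.foldl (fun d cg => d.insert cg.1 cg.2) d) := by
  induction sg with
  | nil => intro d; simp
  | cons cg sg ih =>
    intro d
    simp only [List.foldl_cons, ← pv_mapVal_insert, ih]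

lemma pv_get?_mk_append {V : Type} (xs ys : List (String × V)) (k : String)
    (h : ∀ p ∈ xs, p.1 ≠ k) :
    (PySem.Dict.mk (xs ++ ys)).get? k = (PySem.Dict.mk ys).get? k := by
  induction xs with
  | nil => rfl
  | cons p xs ih =>
    rw [List.cons_append, PySem.Dict.get?_mk_cons]
    have hp : ¬ (p.1 == k) = true := by
      simpa using h p (List.mem_cons_self)
    simp only [hp]
    exact ih (fun q hq => h q (List.mem_cons_of_mem _ hq))

lemma pv_inner {W : Type} (P : String × List String → Bool) (c : W)
    (β : String × List String → List W) :
    ∀ (l : List (String × List String)) (done : List (String × List W)),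
    (done.map Prod.fst ++ l.map Prod.fst).Nodup →
    l.foldl (fun g q =>
        let bucket := g.getD q.1 []
        if bucket.length < 5 && P q then g.insert q.1 (bucket ++ [c]) else g)
      (PySem.Dict.mk (done ++ l.map (fun q => (q.1, β q))))
    = PySem.Dict.mk (done ++ l.map (fun q =>
        (q.1, if (β q).length < 5 && P q then β q ++ [c] else β q))) := by
  intro l
  induction l with
  | nil => intro done _; simp
  | cons q l ih =>
    intro done hnd
    have hnd0 := hnd
    simp only [List.map_cons, List.nodup_append, List.nodup_cons, List.mem_cons] at hnd
    obtain ⟨hnd_done, ⟨hq_notl, hnd_l⟩, hdisj⟩ := hnd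
    have hq_done : ∀ p ∈ done, p.1 ≠ q.1 := by
      intro p hp e
      exact hdisj _ (List.mem_map_of_mem hp) _ (Or.inl rfl) e
    have hq_l : ∀ p ∈ l, p.1 ≠ q.1 := by
      intro p hp e
      exact hq_notl (e ▸ List.mem_map_of_mem hp)
    -- the bucket read for q
    have hget : (PySem.Dict.mk (done ++ (q.1, β q) :: l.map (fun q => (q.1, β q)))).getD q.1 []
        = β q := by
      rw [PySem.Dict.getD_eq_get?_getD, pv_get?_mk_append _ _ _ hq_done,
        PySem.Dict.get?_mk_cons]
      simp
    have hcont : (PySem.Dict.mk (done ++ (q.1, β q) :: l.map (fun q => (q.1, β q)))).contains q.1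
        = true := by
      rw [PySem.Dict.contains_eq_decide_mem_keys]
      simp [PySem.Dict.keys]
    simp only [List.map_cons, List.foldl_cons, hget]
    by_cases hc : ((β q).length < 5 && P q) = true
    · have hins : (PySem.Dict.mk (done ++ (q.1, β q) :: l.map (fun q => (q.1, β q)))).insert q.1
          (β q ++ [c])
          = PySem.Dict.mk ((done ++ [(q.1, β q ++ [c])]) ++ l.map (fun q => (q.1, β q))) := by
        apply PySem.Dict.ext
        rw [PySem.Dict.items_insert_of_contains _ _ hcont]
        show (done ++ (q.1, β q) :: l.map (fun q => (q.1, β q))).map _ = _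
        rw [List.map_append, List.map_cons, List.map_map]
        have h1 : done.map (fun p => if p.1 = q.1 then (q.1, β q ++ [c]) else p)
            = done := by
          conv_rhs => rw [← List.map_id done]
          apply List.map_congr_left
          intro p hp
          simp [hq_done p hp]
        have h2 : l.map ((fun p => if p.1 = q.1 then (q.1, β q ++ [c]) else p)
              ∘ (fun q => (q.1, β q)))
            = l.map (fun q => (q.1, β q)) := by
          apply List.map_congr_left
          intro p hp
          simp [hq_l p hp]
        simp only [beq_iff_eq]
        rw [h1, h2]
        simp
      rw [hc, if_pos rfl, hins, ih]
      · simp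
      · simpa using hnd0
    · rw [if_neg (by simp [hc])]
      have hre : PySem.Dict.mk (done ++ (q.1, β q) :: l.map (fun q => (q.1, β q)))
          = PySem.Dict.mk ((done ++ [(q.1, β q)]) ++ l.map (fun q => (q.1, β q))) := by
        simp
      rw [hre, ih]
      · simp [hc]
      · simpa using hnd0

lemma pv_outer {W : Type} (P : String × List String → W → Bool)
    (l : List (String × List String)) (hl : (l.map Prod.fst).Nodup) :
    ∀ (cs : List W) (β : String × List String → List W),
    cs.foldl (fun g c =>
        l.foldl (fun g q =>
          let bucket := g.getD q.1 []
          if bucket.length < 5 && P q c then g.insert q.1 (bucket ++ [c]) else g) g)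
      (PySem.Dict.mk (l.map (fun q => (q.1, β q))))
    = PySem.Dict.mk (l.map (fun q =>
        (q.1, cs.foldl (fun b c => if b.length < 5 && P q c then b ++ [c] else b) (β q)))) := by
  intro cs
  induction cs with
  | nil => intro β; simp
  | cons c cs ih =>
    intro β
    rw [List.foldl_cons,
      show (PySem.Dict.mk (l.map (fun q => (q.1, β q)))
          = PySem.Dict.mk ([] ++ l.map (fun q => (q.1, β q)))) from by simp,
      pv_inner (fun q => P q c) c β l [] (by simpa using hl)]
    rw [show ([] : List (String × List W)) ++ l.map (fun q =>
        (q.1, if (β q).length < 5 && P q c then β q ++ [c] else β q))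
      = l.map (fun q => (q.1, (fun q' => if (β q').length < 5 && P q' c then β q' ++ [c] else β q') q)) from by simp]
    rw [ih]
    simp

lemma pv_cap {W : Type} (p : W → Bool) :
    ∀ (cs : List W) (acc : List W), acc.length ≤ 5 →
    cs.foldl (fun b c => if b.length < 5 && p c then b ++ [c] else b) acc
      = (acc ++ cs.filter p).take 5 := by
  intro cs
  induction cs with
  | nil =>
    intro acc h
    simp [List.take_of_length_le h]
  | cons c cs ih =>
    intro acc h
    rw [List.foldl_cons]
    by_cases hp : p c = true
    · by_cases hlen : acc.length < 5
      · rw [if_pos (by simp [hp, hlen]), ih (acc ++ [c]) (by simp; omega)]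
        simp [hp]
      · rw [if_neg (by simp [hlen]), ih acc h]
        have h5 : acc.length = 5 := by omega
        rw [List.filter_cons_of_pos hp, List.take_append,
          List.take_append, List.take_of_length_le h, h5]
        simp
    · rw [if_neg (by simp [hp]), ih acc h, List.filter_cons_of_neg (by simp [hp])]

def pvCanon (sg : List (String × List String)) : PySem.Dict String (List String) :=
  sg.foldl (fun d cg => d.insert cg.1 cg.2) PySem.Dict.empty

lemma pv_canon_nodup (sg : List (String × List String)) : (pvCanon sg).keys.Nodup :=
  PySem.Dict.nodup_keys_foldl_insert_key sg Prod.fst (fun _ cg => cg.2) PySem.Dict.empty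
    PySem.Dict.nodup_keys_empty

lemma pv_main (rc : List (List (String × String))) (sg : List (String × List String)) :
    group_recommendations_py rc sg = group_recommendations_py_alt rc sg := by
  unfold group_recommendations_py group_recommendations_py_alt
  simp only []
  have hA :
      sg.foldl (fun d cg =>
        d.insert cg.1 (PySem.List.slice (rc.filter (fun course =>
          cg.2.any (fun gap => PySem.Str.isIn (PySem.Str.lower gap)
            (PySem.Str.lower ((PySem.Dict.mk course).getD "skills_covered" ""))))) none (some 5)))
        PySem.Dict.empty
      = pvMapVal (fun gaps => PySem.List.slice (rc.filter (fun course =>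
          gaps.any (fun gap => PySem.Str.isIn (PySem.Str.lower gap)
            (PySem.Str.lower ((PySem.Dict.mk course).getD "skills_covered" ""))))) none (some 5))
          (pvCanon sg) :=
    pv_foldl_insert_mapVal
        (fun gaps => PySem.List.slice (rc.filter (fun course =>
          gaps.any (fun gap => PySem.Str.isIn (PySem.Str.lower gap)
            (PySem.Str.lower ((PySem.Dict.mk course).getD "skills_covered" ""))))) none (some 5))
        sg PySem.Dict.empty
  have hG0 : sg.foldl (fun d cg => d.insert cg.1 []) PySem.Dict.empty
      = pvMapVal (fun _ => ([] : List (List (String × String)))) (pvCanon sg) :=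
    pv_foldl_insert_mapVal (fun _ => ([] : List (List (String × String)))) sg PySem.Dict.empty
  have hLo : sg.foldl (fun d cg => d.insert cg.1 (cg.2.map PySem.Str.lower)) PySem.Dict.empty
      = pvMapVal (fun gaps => gaps.map PySem.Str.lower) (pvCanon sg) :=
    pv_foldl_insert_mapVal (fun gaps => gaps.map PySem.Str.lower) sg PySem.Dict.empty
  rw [hA, hG0, hLo]
  have hnd : ((pvCanon sg).items.map Prod.fst).Nodup := pv_canon_nodup sg
  have hndl : (((pvMapVal (fun gaps => gaps.map PySem.Str.lower) (pvCanon sg)).items).map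
      Prod.fst).Nodup := by
    simpa [pvMapVal, List.map_map, Function.comp] using hnd
  by_cases hg : ((pvMapVal (fun gaps => gaps.map PySem.Str.lower) (pvCanon sg)).values.any
      (fun gs => !gs.isEmpty)) = true
  · rw [if_pos hg]
    have hg0 : pvMapVal (fun _ => ([] : List (List (String × String)))) (pvCanon sg)
        = PySem.Dict.mk (((pvMapVal (fun gaps => gaps.map PySem.Str.lower) (pvCanon sg)).items).map
            (fun q => (q.1, []))) := by
      apply PySem.Dict.ext
      simp [pvMapVal, List.map_map, Function.comp]
    rw [hg0]
    refine Eq.trans ?_ (congrArg PySem.Dict.items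
      (pv_outer
        (fun q course => q.2.any (fun gap => PySem.Str.isIn gap
          (PySem.Str.lower ((PySem.Dict.mk course).getD "skills_covered" ""))))
        ((pvMapVal (fun gaps => gaps.map PySem.Str.lower) (pvCanon sg)).items) hndl rc
        (fun _ => [])).symm)
    show ((pvCanon sg).items.map (fun p => (p.1, _))) = _
    rw [show ((pvMapVal (fun gaps => gaps.map PySem.Str.lower) (pvCanon sg)).items)
        = (pvCanon sg).items.map (fun p => (p.1, p.2.map PySem.Str.lower)) from rfl,
      List.map_map]
    apply List.map_congr_left
    intro p _
    simp only [Function.comp]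
    refine congrArg (fun v => (p.1, v)) ?_
    rw [pv_cap _ rc [] (by simp),
      PySem.List.slice_to _ (by norm_num : (0:Int) ≤ 5)]
    simp only [List.nil_append]
    rw [show ((5 : Int).toNat) = 5 from rfl]
    refine congrArg (List.take 5) ?_
    apply List.filter_congr
    intro c _
    rw [List.any_map]
    refine congrArg p.2.any ?_
    funext gap
    simp [Function.comp, PySem.Str.toList_lower]
  · rw [if_neg hg]
    show ((pvCanon sg).items.map (fun p => (p.1, _))) = ((pvCanon sg).items.map (fun p => (p.1, [])))
    apply List.map_congr_left
    intro p hp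
    have hval : (p.2.map PySem.Str.lower) ∈ (pvMapVal (fun gaps =>
        gaps.map PySem.Str.lower) (pvCanon sg)).values := by
      show _ ∈ ((pvCanon sg).items.map (fun p => (p.1, p.2.map PySem.Str.lower))).map Prod.snd
      rw [List.map_map]
      exact List.mem_map_of_mem hp
    have hg' : ((pvMapVal (fun gaps => gaps.map PySem.Str.lower) (pvCanon sg)).values.any
        (fun gs => !gs.isEmpty)) = false := by
      simpa using hg
    have hp2 : p.2 = [] := by
      have h2 := List.any_eq_false.mp hg' _ hval
      simpa using h2
    refine congrArg (fun v => (p.1, v)) ?_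
    rw [hp2]
    simp [PySem.List.slice_to _ (by norm_num : (0:Int) ≤ 5)]

-- ===== VERDICT (by name: the statement is the Claim_ definition above) =====
theorem group_recommendations_py_spec : Claim_equal_group_recommendations_py := by
  intro ranked_courses skill_gaps _ _
  exact pv_main ranked_courses skill_gaps
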